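-- pv_equiv track=rewrite | github.com/josephors/proyecto-inf292 | Entrega 2/solver/solucionador_de_instancias_lpsolve.py | obtener_fines_de_semana
-- ===== SOURCE A (Python) =====
-- def es_fin_de_semana(nombre_dia):
--     """
--     Determina si un día es fin de semana.
--
--     Args:
--         nombre_dia: Nombre del día (e.g., "sabado_1", "domingo_2").
--
--     Returns:
--         bool: True si el día es sábado o domingo.
--     """
--     nombre_lower = nombre_dia.lower()
--     return "sabado" in nombre_lower or "domingo" in nombre_lower
--
-- def obtener_fines_de_semana(datos_instancia):
--     """
--     Identifica los fines de semana en la instancia.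
--
--     Un fin de semana es una secuencia consecutiva de días (sábado-domingo)
--     que se interrumpe al llegar un día laborable.
--
--     Args:
--         datos_instancia: Diccionario con la clave 'demanda_dias'.
--
--     Returns:
--         list[list[int]]: Lista de fines de semana. Cada elemento es una lista
--                          con los índices de días (1-indexed) del fin de semana.
--                          Ejemplo: [[6, 7], [13, 14]] para 2 fines de semana.
--     """
--     dias_ordenados = sorted(datos_instancia["demanda_dias"].keys())
--     fines_de_semana = []
--     fin_actual = []
--
--     for idx, nombre_dia in enumerate(dias_ordenados, start=1):
--         if es_fin_de_semana(nombre_dia):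
--             fin_actual.append(idx)
--         else:
--             if fin_actual:
--                 fines_de_semana.append(fin_actual)
--                 fin_actual = []
--
--     if fin_actual:
--         fines_de_semana.append(fin_actual)
--
--     return fines_de_semana
-- ===== SOURCE B (Python) =====
-- def es_fin_de_semana(nombre_dia):
--     nombre_lower = nombre_dia.lower()
--     return "sabado" in nombre_lower or "domingo" in nombre_lower
--
-- def obtener_fines_de_semana(datos_instancia):
--     # Two-pass decomposition: first collect the 1-based positions of all
--     # weekend days, then group consecutive positions by index gaps.
--     dias_ordenados = sorted(datos_instancia["demanda_dias"].keys())
--     indices = [idx for idx, nombre in enumerate(dias_ordenados, start=1)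
--                if es_fin_de_semana(nombre)]
--     grupos = []
--     for i in indices:
--         if grupos and grupos[-1][-1] == i - 1:
--             grupos[-1].append(i)
--         else:
--             grupos.append([i])
--     return grupos
-- ===== Notes on version B (the rewrite author's own statement) =====
-- stated objective: alternative
-- what changed: A groups in one stateful pass carrying a current-group accumulator flushed on each non-weekend day; B first collects the flat list of 1-based weekend positions and then groups that index list by consecutive-integer gaps.
import Mathlib
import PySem

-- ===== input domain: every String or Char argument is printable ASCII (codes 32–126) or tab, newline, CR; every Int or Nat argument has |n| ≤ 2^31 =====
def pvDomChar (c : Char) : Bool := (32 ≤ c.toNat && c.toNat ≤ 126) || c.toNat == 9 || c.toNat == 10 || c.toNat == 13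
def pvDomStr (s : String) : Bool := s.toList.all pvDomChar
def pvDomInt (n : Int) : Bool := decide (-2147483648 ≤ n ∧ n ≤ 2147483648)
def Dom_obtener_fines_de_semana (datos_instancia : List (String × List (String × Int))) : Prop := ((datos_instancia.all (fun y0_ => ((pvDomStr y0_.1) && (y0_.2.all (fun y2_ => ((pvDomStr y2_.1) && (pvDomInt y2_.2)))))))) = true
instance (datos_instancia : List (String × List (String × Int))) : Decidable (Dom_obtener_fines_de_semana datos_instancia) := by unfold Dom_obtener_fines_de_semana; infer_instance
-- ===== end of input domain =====

-- B replaces A's single stateful flush-on-workday pass by collect-weekend-indices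
-- then group-by-consecutive-gaps (alternative decomposition, same cost).


-- ===== PORT A =====
-- shared same-module helper (used verbatim by both Pythons)
def es_fin_de_semana (nombre_dia : String) : Bool :=
  let nombre_lower := PySem.Str.lower nombre_dia
  PySem.Str.isIn "sabado" nombre_lower || PySem.Str.isIn "domingo" nombre_lower

-- body of A's for-loop: state (fines_de_semana, fin_actual)
def pvStepA (st : List (List Int) × List Int) (p : Int × String) : List (List Int) × List Int :=
  if es_fin_de_semana p.2 then (st.1, st.2 ++ [p.1])
  else if st.2 ≠ [] then (st.1 ++ [st.2], []) else st

def obtener_fines_de_semana (datos_instancia : List (String × List (String × Int))) : List (List Int) :=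
  match (PySem.Dict.ofList datos_instancia).get? "demanda_dias" with
  | none => []  -- Python raises KeyError here; excluded by Pre_
  | some demanda =>
    let dias_ordenados := PySem.List.sorted (PySem.Dict.ofList demanda).keys (fun x => x) false
    let st := (PySem.List.enumerate dias_ordenados 1).foldl pvStepA ([], [])
    if st.2 ≠ [] then st.1 ++ [st.2] else st.1

-- ===== PORT B =====
-- body of B's grouping loop over the flat index list
def pvStepB (grupos : List (List Int)) (i : Int) : List (List Int) :=
  match grupos.getLast? with
  | some last =>
    if last.getLast? = some (i - 1) then grupos.dropLast ++ [last ++ [i]]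
    else grupos ++ [[i]]
  | none => grupos ++ [[i]]

def obtener_fines_de_semana_alt (datos_instancia : List (String × List (String × Int))) : List (List Int) :=
  match (PySem.Dict.ofList datos_instancia).get? "demanda_dias" with
  | none => []  -- Python raises KeyError here; excluded by Pre_
  | some demanda =>
    let dias_ordenados := PySem.List.sorted (PySem.Dict.ofList demanda).keys (fun x => x) false
    let indices := ((PySem.List.enumerate dias_ordenados 1).filter (fun p => es_fin_de_semana p.2)).map (·.1)
    indices.foldl pvStepB []

-- ===== PRECONDITION & SPEC =====
-- Pre_ excludes exactly the inputs without a "demanda_dias" key, on which Python A raises KeyError.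
def Pre_obtener_fines_de_semana (datos_instancia : List (String × List (String × Int))) : Prop :=
  (PySem.Dict.ofList datos_instancia).contains "demanda_dias" = true
instance (datos_instancia : List (String × List (String × Int))) : Decidable (Pre_obtener_fines_de_semana datos_instancia) := by unfold Pre_obtener_fines_de_semana; infer_instance
def pvWitness_obtener_fines_de_semana : (List (String × List (String × Int))) :=
  [("demanda_dias", [("sabado_1", 5), ("lunes_2", 3)])]

def Spec_obtener_fines_de_semana (datos_instancia : List (String × List (String × Int))) (out : List (List Int)) : Prop := out = obtener_fines_de_semana_alt datos_instancia
instance (datos_instancia : List (String × List (String × Int))) (out : List (List Int)) : Decidable (Spec_obtener_fines_de_semana datos_instancia out) := by unfold Spec_obtener_fines_de_semana; infer_instance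

-- ===== CLAIM (what is proved, stated in full; the proofs are below) =====
def Claim_equal_obtener_fines_de_semana : Prop := ∀ (datos_instancia : List (String × List (String × Int))), Dom_obtener_fines_de_semana datos_instancia → Pre_obtener_fines_de_semana datos_instancia → Spec_obtener_fines_de_semana datos_instancia (obtener_fines_de_semana datos_instancia)

-- ===== LEMMAS AND PROOFS =====

-- Invariant linking A's (acc, cur) state at position s to B's groups-so-far g.
def pvInv (s : Int) (acc : List (List Int)) (cur : List Int) (g : List (List Int)) : Prop :=
  (cur = [] ∧ g = acc ∧ ∀ l e, acc.getLast? = some l → l.getLast? = some e → e ≤ s - 2)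
  ∨ (cur ≠ [] ∧ g = acc ++ [cur] ∧ cur.getLast? = some (s - 1))

set_option maxHeartbeats 1000000 in
theorem pvMain (xs : List String) : ∀ (s : Int) (acc : List (List Int)) (cur : List Int)
    (g : List (List Int)), pvInv s acc cur g →
    (let st := (PySem.List.enumerate xs s).foldl pvStepA (acc, cur);
     if st.2 ≠ [] then st.1 ++ [st.2] else st.1)
    = (((PySem.List.enumerate xs s).filter (fun p => es_fin_de_semana p.2)).map (·.1)).foldl pvStepB g := by
  induction xs with
  | nil =>
    intro s acc cur g hinv
    simp only [PySem.List.enumerate_nil, List.foldl_nil, List.filter_nil, List.map_nil]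
    rcases hinv with ⟨hc, hg, _⟩ | ⟨hc, hg, _⟩
    · simp [hc, hg]
    · simp [hc, hg]
  | cons x xs ih =>
    intro s acc cur g hinv
    rw [PySem.List.enumerate_cons]
    by_cases hx : es_fin_de_semana x = true
    · -- weekend day: A appends s to cur; B's index list starts with s
      simp only [List.foldl_cons, List.filter_cons, hx, List.map_cons, ite_true]
      have hstepA : pvStepA (acc, cur) (s, x) = (acc, cur ++ [s]) := by
        simp [pvStepA, hx]
      have hB : pvStepB g s = acc ++ [cur ++ [s]] := by
        rcases hinv with ⟨hc, hg, hlast⟩ | ⟨hc, hg, hlast⟩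
        · rw [hg, hc]
          unfold pvStepB
          cases hl : acc.getLast? with
          | none => simp
          | some last =>
            cases hll : last.getLast? with
            | none => simp [hll]
            | some e =>
              have he := hlast last e hl hll
              have hne : ¬ (last.getLast? = some (s - 1)) := by
                rw [hll]; intro h; injection h with h; omega
              simp [hne]
        · rw [hg]
          have hl : (acc ++ [cur]).getLast? = some cur := List.getLast?_concat
          unfold pvStepB
          rw [hl]
          simp [hlast]
      rw [hstepA, hB]
      exact ih (s + 1) acc (cur ++ [s]) (acc ++ [cur ++ [s]]) (Or.inr
        ⟨by simp, rfl, by rw [List.getLast?_concat]; congr 1; omega⟩)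
    · -- workday: A flushes cur (if nonempty); B skips the index
      have hxf : es_fin_de_semana x = false := by
        cases h : es_fin_de_semana x
        · rfl
        · exact absurd h hx
      simp only [List.foldl_cons, List.filter_cons, hxf, Bool.false_eq_true, if_false]
      have hstepA : pvStepA (acc, cur) (s, x)
          = if cur ≠ [] then (acc ++ [cur], []) else (acc, cur) := by
        simp [pvStepA, hxf]
      rw [hstepA]
      by_cases hc : cur = []
      · simp only [hc, ne_eq, not_true_eq_false, if_false]
        rcases hinv with ⟨_, hg, hlast⟩ | ⟨hc', _, _⟩
        · exact ih (s + 1) acc ([] : List Int) g (Or.inl ⟨rfl, hg, by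
            intro l e h1 h2; have := hlast l e h1 h2; omega⟩)
        · exact absurd hc hc'
      · simp only [ne_eq, hc, not_false_eq_true, if_true]
        rcases hinv with ⟨hc', _, _⟩ | ⟨_, hg, hlast⟩
        · exact absurd hc' hc
        · rw [hg]
          exact ih (s + 1) (acc ++ [cur]) ([] : List Int) (acc ++ [cur]) (Or.inl ⟨rfl, rfl, by
            intro l e h1 h2
            rw [List.getLast?_concat] at h1
            injection h1 with h1
            subst h1
            rw [hlast] at h2
            injection h2 with h2
            omega⟩)

-- ===== VERDICT (by name: the statement is the Claim_ definition above) =====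
theorem obtener_fines_de_semana_spec : Claim_equal_obtener_fines_de_semana := by
  intro datos _hdom hpre
  unfold Spec_obtener_fines_de_semana obtener_fines_de_semana obtener_fines_de_semana_alt
  cases hget : (PySem.Dict.ofList datos).get? "demanda_dias" with
  | none =>
    exfalso
    unfold Pre_obtener_fines_de_semana at hpre
    rw [PySem.Dict.contains_eq_isSome_get?, hget] at hpre
    simp at hpre
  | some demanda =>
    exact pvMain _ 1 [] [] [] (Or.inl ⟨rfl, rfl, by simp⟩)
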